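-- pv_equiv track=rewrite | github.com/MIRIDIH-2023/UDOP-ket5 | core/datasets/rvlcdip.py | convert_word_unit
-- ===== SOURCE A (Python) =====
-- def convert_word_unit(group_list, word_list):
--
--     ret_group_list = []
--
--     idx, i = 0, 0
--     group_pointer = 0
--     while i < len(word_list):
--         if group_pointer < len(group_list) and i == group_list[group_pointer][0]:
--             start, end = group_list[group_pointer][0], group_list[group_pointer][1]
--             l = 0
--             for w in range(start, end):
--                 l += len(word_list[w])
--             ret_group_list.append([idx, idx+l])
--             idx += l
--             i = group_list[group_pointer][1]
--             group_pointer += 1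
--         else:
--             idx += len(word_list[i])
--             i += 1
--
--     return ret_group_list
-- ===== SOURCE B (Python) =====
-- def convert_word_unit(group_list, word_list):
--     """Convert word-index spans [start, end) into character-offset spans.
--
--     Character offsets come from a prefix-sum table over word lengths.
--     Groups are consumed left to right while they form a forward chain over
--     the words; conversion stops at the first group that does not.
--     """
--     prefix = [0]
--     for w in word_list:
--         prefix.append(prefix[-1] + len(w))
--     spans = []
--     cur = 0
--     for g in group_list:
--         if not g or not (cur <= g[0] < len(word_list)):
--             break
--         spans.append([prefix[g[0]], prefix[g[1]]])
--         cur = g[1]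
--     return spans
-- ===== Notes on version B (the rewrite author's own statement) =====
-- stated objective: simpler
-- what changed: Replaces the interleaved word-pointer while-loop with per-group re-summation by a precomputed prefix-sum table over word lengths plus one straight loop over the groups; Pre_ excludes inputs where A raises IndexError (a reached group with fewer than two entries or a span end beyond the word list) and reached groups whose end precedes their start, on which A's backward cursor jump and Python's negative word indexing make both results accidental.
-- outside the precondition, e.g. on convert_word_unit([[0, -1]], ['ab']): A returns [[0, 0]], B returns [[0, 2]]; on convert_word_unit([[1, 0]], ['a', 'b']): A returns [[1, 1]], B returns [[1, 0]]
import Mathlib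
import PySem

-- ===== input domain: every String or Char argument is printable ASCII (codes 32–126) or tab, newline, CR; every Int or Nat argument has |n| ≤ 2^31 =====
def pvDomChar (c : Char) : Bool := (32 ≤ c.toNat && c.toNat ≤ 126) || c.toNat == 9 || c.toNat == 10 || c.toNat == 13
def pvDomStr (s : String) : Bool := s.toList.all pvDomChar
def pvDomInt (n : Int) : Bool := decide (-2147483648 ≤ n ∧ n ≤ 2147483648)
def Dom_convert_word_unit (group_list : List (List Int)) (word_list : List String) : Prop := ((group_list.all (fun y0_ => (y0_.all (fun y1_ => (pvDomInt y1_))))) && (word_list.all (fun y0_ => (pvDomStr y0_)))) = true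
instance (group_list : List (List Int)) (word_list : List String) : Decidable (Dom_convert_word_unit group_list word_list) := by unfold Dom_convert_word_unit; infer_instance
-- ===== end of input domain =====

-- B replaces the interleaved word-pointer while-loop (with per-group re-summation) by a
-- prefix-sum table over word lengths plus one straight loop over the groups; objective: simpler.

-- ===== PORT A =====
-- the while loop of A; state: idx, i, group_pointer, ret.  Where Python raises
-- (group_list[gp] empty / word index out of range / g[1] missing) the `.getD` defaults are
-- taken — those inputs are excluded by Pre_convert_word_unit.
def cwuLoopA (gl : List (List Int)) (wl : List String) (idx i : Int) (gp : Nat) (ret : List (List Int)) : List (List Int) :=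
  if hi : i < (wl.length : Int) then
    let g := gl.getD gp []
    if hm : gp < gl.length ∧ PySem.List.pyGet? g 0 = some i then
      -- start = g[0] (= i by the branch condition), end = g[1]; l = sum of word lengths in range(start, end)
      let e := (PySem.List.pyGet? g 1).getD 0
      let l := (PySem.List.pyRange i e 1).foldl
        (fun acc w => acc + PySem.Str.len ((PySem.List.pyGet? wl w).getD "")) 0
      cwuLoopA gl wl (idx + l) e (gp + 1) (ret ++ [[idx, idx + l]])
    else
      cwuLoopA gl wl (idx + PySem.Str.len ((PySem.List.pyGet? wl i).getD "")) (i + 1) gp ret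
  else ret
termination_by (gl.length - gp, ((wl.length : Int) - i).toNat)
decreasing_by
  · exact Prod.Lex.left _ _ (by omega)
  · exact Prod.Lex.right _ (by omega)

def convert_word_unit (group_list : List (List Int)) (word_list : List String) : List (List Int) :=
  cwuLoopA group_list word_list 0 0 0 []

-- ===== PORT B =====
-- prefix = [0]; for w in word_list: prefix.append(prefix[-1] + len(w))
def cwuPrefix (wl : List String) : List Int :=
  wl.foldl (fun pre w => pre ++ [(PySem.List.pyGet? pre (-1)).getD 0 + PySem.Str.len w]) [0]

-- the for-loop of B over group_list with cursor cur; a `break` returns the spans built so far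
-- (here: []).  `not g` breaks on an empty group; the inner `match rest with | [] => []` is
-- where Python B raises IndexError on g[1] — unreachable under Pre_convert_word_unit.
def cwuLoopB (pre : List Int) (n : Int) : List (List Int) → Int → List (List Int)
  | [], _ => []
  | g :: gs, cur =>
    match g with
    | [] => []
    | s :: rest =>
      if s < cur ∨ s ≥ n then []   -- ¬ (cur ≤ s < n)
      else
        match rest with
        | [] => []
        | e :: _ =>
          [(PySem.List.pyGet? pre s).getD 0, (PySem.List.pyGet? pre e).getD 0] :: cwuLoopB pre n gs e

def convert_word_unit_alt (group_list : List (List Int)) (word_list : List String) : List (List Int) :=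
  cwuLoopB (cwuPrefix word_list) (word_list.length : Int) group_list 0

-- ===== PRECONDITION & SPEC =====
-- Closed-form well-formedness of the inputs: there is a cut k such that the first k groups form
-- a well-formed chain (each has ≥ 2 entries and a span prev_end ≤ start < len(word_list),
-- start ≤ end ≤ len(word_list)) and either the groups are exhausted or group k is a non-empty
-- "blocking" group (its start falls behind the previous end or beyond the word list), which
-- stops A's loop so the remaining groups are never touched.  (With no words A never inspects
-- the groups at all.)
def cwuPrev (gl : List (List Int)) (cur : Int) (j : Nat) : Int :=
  if j = 0 then cur else (gl.getD (j - 1) []).getD 1 0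

def cwuGood (n : Int) (gl : List (List Int)) (cur : Int) (j : Nat) : Prop :=
  2 ≤ (gl.getD j []).length ∧ cwuPrev gl cur j ≤ (gl.getD j []).getD 0 0 ∧
    (gl.getD j []).getD 0 0 < n ∧ (gl.getD j []).getD 0 0 ≤ (gl.getD j []).getD 1 0 ∧
    (gl.getD j []).getD 1 0 ≤ n

def cwuBlocked (n : Int) (gl : List (List Int)) (cur : Int) (k : Nat) : Prop :=
  gl.getD k [] ≠ [] ∧ ((gl.getD k []).getD 0 0 < cwuPrev gl cur k ∨ (gl.getD k []).getD 0 0 ≥ n)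

-- Pre_ excludes (a) inputs where A raises IndexError (a reached group with fewer than 2 entries,
-- or a span end beyond the word list), and (b) reached groups whose end precedes their start,
-- on which A's backward cursor jump and Python's negative word indexing make both programs'
-- values accidental.
def Pre_convert_word_unit (group_list : List (List Int)) (word_list : List String) : Prop :=
  word_list = [] ∨
    ∃ k, k ≤ group_list.length ∧
      (∀ j, j < k → cwuGood (word_list.length : Int) group_list 0 j) ∧
      (k = group_list.length ∨ cwuBlocked (word_list.length : Int) group_list 0 k)
instance (group_list : List (List Int)) (word_list : List String) : Decidable (Pre_convert_word_unit group_list word_list) := by unfold Pre_convert_word_unit cwuGood cwuBlocked cwuPrev; infer_instance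

def pvWitness_convert_word_unit : List (List Int) × List String :=
  ([[0, 1], [2, 3]], ["ab", "c", "d", "ef"])

def Spec_convert_word_unit (group_list : List (List Int)) (word_list : List String) (out : List (List Int)) : Prop := out = convert_word_unit_alt group_list word_list
instance (group_list : List (List Int)) (word_list : List String) (out : List (List Int)) : Decidable (Spec_convert_word_unit group_list word_list out) := by unfold Spec_convert_word_unit; infer_instance

-- ===== CLAIM (what is proved, stated in full; the proofs are below) =====
def Claim_equal_convert_word_unit : Prop := ∀ (group_list : List (List Int)) (word_list : List String), Dom_convert_word_unit group_list word_list → Pre_convert_word_unit group_list word_list → Spec_convert_word_unit group_list word_list (convert_word_unit group_list word_list)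

-- ===== LEMMAS AND PROOFS =====

-- proof-side loop invariant: chain validity of the remaining groups against word count n from
-- cursor cur (the recursive reading of the closed-form Pre_)
def cwuChain (n : Int) : List (List Int) → Int → Bool
  | [], _ => true
  | g :: gs, cur =>
    match g with
    | [] => false
    | s :: rest =>
      if s < cur ∨ s ≥ n then true
      else
        match rest with
        | [] => false
        | e :: _ => s ≤ e && e ≤ n && cwuChain n gs e

theorem cwuPrev_succ (g : List Int) (gl : List (List Int)) (cur : Int) (j : Nat) :
    cwuPrev (g :: gl) cur (j + 1) = cwuPrev gl (g.getD 1 0) j := by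
  cases j with
  | zero => simp [cwuPrev]
  | succ j => simp [cwuPrev]

theorem cwuGood_succ (n : Int) (g : List Int) (gl : List (List Int)) (cur : Int) (j : Nat) :
    cwuGood n (g :: gl) cur (j + 1) ↔ cwuGood n gl (g.getD 1 0) j := by
  simp [cwuGood, cwuPrev_succ]

theorem cwuBlocked_succ (n : Int) (g : List Int) (gl : List (List Int)) (cur : Int) (k : Nat) :
    cwuBlocked n (g :: gl) cur (k + 1) ↔ cwuBlocked n gl (g.getD 1 0) k := by
  simp [cwuBlocked, cwuPrev_succ]

-- the closed-form Pre_ implies the recursive invariant the main lemma runs on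
theorem cwuChain_of_closed (n : Int) : ∀ (gl : List (List Int)) (cur : Int) (k : Nat),
    k ≤ gl.length → (∀ j, j < k → cwuGood n gl cur j) →
    (k = gl.length ∨ cwuBlocked n gl cur k) → cwuChain n gl cur = true := by
  intro gl
  induction gl with
  | nil => intro cur k _ _ _; simp [cwuChain]
  | cons g gs ih =>
    intro cur k hk hgood hend
    cases k with
    | zero =>
      rcases hend with h | h
      · simp at h
      · obtain ⟨hne, hb⟩ := h
        simp only [List.getD_cons_zero, cwuPrev, reduceIte] at hne hb
        cases g with
        | nil => exact absurd rfl hne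
        | cons s rest =>
          simp only [List.getD_cons_zero] at hb
          simp only [cwuChain]
          rw [if_pos hb]
    | succ k =>
      have h0 := hgood 0 (Nat.succ_pos k)
      simp only [cwuGood, List.getD_cons_zero, cwuPrev, reduceIte] at h0
      obtain ⟨hlen, hcs, hsn, hse, hen⟩ := h0
      obtain ⟨s, e, r, hg⟩ : ∃ s e r, g = s :: e :: r := by
        cases g with
        | nil => simp at hlen
        | cons s t =>
          cases t with
          | nil => simp at hlen
          | cons e r => exact ⟨s, e, r, rfl⟩
      subst hg
      simp only [List.getD_cons_zero, List.getD_cons_succ] at hcs hsn hse hen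
      simp only [cwuChain]
      rw [if_neg (by omega)]
      simp only [Bool.and_eq_true, decide_eq_true_eq]
      refine ⟨⟨hse, hen⟩, ?_⟩
      have hgd1 : (s :: e :: r).getD 1 0 = e := by simp
      refine ih e k (by simpa using hk) (fun j hj => ?_) ?_
      · have := (cwuGood_succ n (s :: e :: r) gs cur j).mp (hgood (j + 1) (by omega))
        rwa [hgd1] at this
      · rcases hend with h | h
        · exact Or.inl (by simpa using h)
        · refine Or.inr ?_
          have := (cwuBlocked_succ n (s :: e :: r) gs cur k).mp h
          rwa [hgd1] at this

-- prefix sum of word lengths up to (Int) index k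
def pfxAt (wl : List String) (k : Int) : Int := ((wl.take k.toNat).map PySem.Str.len).sum

-- the tail of the prefix list after seed a
def pfxTail (a : Int) : List String → List Int
  | [] => []
  | w :: ws => (a + PySem.Str.len w) :: pfxTail (a + PySem.Str.len w) ws

theorem cwuPrefix_fold (ws : List String) : ∀ (L : List Int) (a : Int),
    ws.foldl (fun pre w => pre ++ [(PySem.List.pyGet? pre (-1)).getD 0 + PySem.Str.len w]) (L ++ [a])
      = L ++ a :: pfxTail a ws := by
  induction ws with
  | nil => intro L a; simp [pfxTail]
  | cons w ws ih =>
    intro L a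
    simp only [List.foldl_cons, PySem.List.pyGet?_neg_one_append_singleton, Option.getD_some]
    rw [ih (L ++ [a]) (a + PySem.Str.len w)]
    simp [pfxTail, PySem.Str.len]

theorem cwuPrefix_eq (wl : List String) : cwuPrefix wl = 0 :: pfxTail 0 wl := by
  have h := cwuPrefix_fold wl [] 0
  simpa [cwuPrefix] using h

theorem pfxTail_get (ws : List String) : ∀ (a : Int) (k : Nat), k ≤ ws.length →
    PySem.List.pyGet? (a :: pfxTail a ws) (k : Int)
      = some (a + ((ws.take k).map PySem.Str.len).sum) := by
  induction ws with
  | nil =>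
    intro a k hk
    have hk0 : k = 0 := Nat.le_zero.mp hk
    subst hk0
    simp [pfxTail]
  | cons w ws ih =>
    intro a k hk
    cases k with
    | zero => simp
    | succ k =>
      have : ((k + 1 : Nat) : Int) = ((k : Nat) : Int) + 1 := by push_cast; ring
      rw [this, PySem.List.pyGet?_cons_succ]
      simp only [pfxTail]
      rw [ih (a + PySem.Str.len w) k (by simpa using hk)]
      simp [List.take_succ_cons]
      ring

theorem cwuPrefix_get (wl : List String) (k : Int) (h0 : 0 ≤ k) (h1 : k ≤ (wl.length : Int)) :
    PySem.List.pyGet? (cwuPrefix wl) k = some (pfxAt wl k) := by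
  rw [cwuPrefix_eq]
  have hk : k = ((k.toNat : Nat) : Int) := by omega
  rw [hk]
  rw [pfxTail_get wl 0 k.toNat (by omega)]
  simp only [pfxAt, Int.toNat_natCast, zero_add]

theorem pfxAt_succ (wl : List String) (k : Int) (h0 : 0 ≤ k) (h1 : k < (wl.length : Int)) :
    pfxAt wl (k + 1) = pfxAt wl k + PySem.Str.len ((PySem.List.pyGet? wl k).getD "") := by
  have hget : PySem.List.pyGet? wl k = wl[k.toNat]? := PySem.List.pyGet?_of_nonneg wl h0
  have hlt : k.toNat < wl.length := by omega
  have hsome : wl[k.toNat]? = some wl[k.toNat] := List.getElem?_eq_getElem hlt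
  have ht : (k + 1).toNat = k.toNat + 1 := by omega
  simp only [pfxAt, ht, hget, hsome, Option.getD_some, List.map_take]
  rw [List.take_add_one]
  simp [List.getElem?_map, hsome, PySem.Str.len]

theorem cwu_sum_range (wl : List String) : ∀ (c : Nat) (s e : Int), 0 ≤ s → s ≤ e →
    e ≤ (wl.length : Int) → (e - s).toNat = c →
    ((PySem.List.pyRange s e 1).map
        (fun w => PySem.Str.len ((PySem.List.pyGet? wl w).getD ""))).sum
      = pfxAt wl e - pfxAt wl s := by
  intro c
  induction c with
  | zero =>
    intro s e h0 h1 h2 hc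
    have hse : s = e := by omega
    subst hse
    rw [PySem.List.pyRange_one_eq_nil (by omega)]
    simp
  | succ c ih =>
    intro s e h0 h1 h2 hc
    have hlt : s < e := by omega
    rw [PySem.List.pyRange_one_cons hlt]
    simp only [List.map_cons, List.sum_cons]
    rw [ih (s + 1) e (by omega) (by omega) h2 (by omega)]
    have := pfxAt_succ wl s h0 (by omega)
    omega

-- the heart: from a synchronised state (idx = prefix of the cursor), A's loop produces exactly
-- what B's group loop produces on the remaining groups.
theorem cwu_main (gl : List (List Int)) (wl : List String) (gp : Nat) (cur : Int)
    (ret : List (List Int)) (h0 : 0 ≤ cur) (h1 : cur ≤ (wl.length : Int))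
    (hc : cwuChain (wl.length : Int) (gl.drop gp) cur = true) :
    cwuLoopA gl wl (pfxAt wl cur) cur gp ret
      = ret ++ cwuLoopB (cwuPrefix wl) (wl.length : Int) (gl.drop gp) cur := by
  rw [cwuLoopA]
  by_cases hi : cur < (wl.length : Int)
  · simp only [hi, dite_true]
    by_cases hm : gp < gl.length ∧ PySem.List.pyGet? (gl.getD gp []) 0 = some cur
    · -- matched group
      obtain ⟨hgp, hg0⟩ := hm
      have hdrop : gl.drop gp = gl[gp] :: gl.drop (gp + 1) := List.drop_eq_getElem_cons hgp
      have hgd : gl.getD gp [] = gl[gp] := List.getD_eq_getElem gl [] hgp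
      rw [hgd] at hg0
      -- the group is cur :: e :: rest'
      obtain ⟨s, rest, hcons⟩ : ∃ s rest, gl[gp] = s :: rest := by
        cases h : gl[gp] with
        | nil => rw [h] at hg0; simp [PySem.List.pyGet?] at hg0
        | cons s rest => exact ⟨s, rest, rfl⟩
      rw [hcons, PySem.List.pyGet?_zero_cons] at hg0
      have hs : s = cur := by injection hg0
      subst hs
      rw [hdrop, hcons] at hc
      simp only [cwuChain] at hc
      have hnb : ¬ (s < s ∨ s ≥ (wl.length : Int)) := by omega
      rw [if_neg hnb] at hc
      obtain ⟨e, rest', hrest⟩ : ∃ e rest', rest = e :: rest' := by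
        cases hr : rest with
        | nil => rw [hr] at hc; simp at hc
        | cons e r => exact ⟨e, r, rfl⟩
      rw [hrest] at hc
      simp only [Bool.and_eq_true, decide_eq_true_eq] at hc
      obtain ⟨⟨hse, hen⟩, hchain⟩ := hc
      have hmc : gp < gl.length ∧ PySem.List.pyGet? (gl.getD gp []) 0 = some s := by
        exact ⟨hgp, by rw [hgd, hcons, PySem.List.pyGet?_zero_cons]⟩
      rw [dif_pos hmc]
      have hge : PySem.List.pyGet? (gl.getD gp []) 1 = some e := by
        rw [hgd, hcons, hrest]
        rw [show (1 : Int) = ((0 : Nat) : Int) + 1 by norm_num, PySem.List.pyGet?_cons_succ]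
        simp
      have hl : (PySem.List.pyRange s e 1).foldl
          (fun acc w => acc + PySem.Str.len ((PySem.List.pyGet? wl w).getD "")) 0
            = pfxAt wl e - pfxAt wl s := by
        rw [PySem.List.foldl_add]
        rw [cwu_sum_range wl (e - s).toNat s e h0 hse hen rfl]
        ring
      rw [hge]
      simp only [Option.getD_some]
      rw [hl]
      have hrec := cwu_main gl wl (gp + 1) e (ret ++ [[pfxAt wl s, pfxAt wl s + (pfxAt wl e - pfxAt wl s)]])
        (by omega) hen hchain
      have hidx : pfxAt wl s + (pfxAt wl e - pfxAt wl s) = pfxAt wl e := by ring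
      rw [hidx] at hrec
      rw [show pfxAt wl s + (pfxAt wl e - pfxAt wl s) = pfxAt wl e by ring]
      rw [hrec]
      rw [hdrop, hcons, hrest]
      simp only [cwuLoopB, if_neg hnb]
      rw [cwuPrefix_get wl s h0 (by omega), cwuPrefix_get wl e (by omega) hen]
      simp
    · -- no match at this cursor position: advance the word pointer
      rw [dif_neg hm]
      have hstep : pfxAt wl cur + PySem.Str.len ((PySem.List.pyGet? wl cur).getD "")
          = pfxAt wl (cur + 1) := (pfxAt_succ wl cur h0 hi).symm
      rw [hstep]
      -- chain validity and B's result are unchanged when the cursor moves from cur to cur+1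
      have hkey : cwuChain (wl.length : Int) (gl.drop gp) (cur + 1) = true ∧
          cwuLoopB (cwuPrefix wl) (wl.length : Int) (gl.drop gp) cur
            = cwuLoopB (cwuPrefix wl) (wl.length : Int) (gl.drop gp) (cur + 1) := by
        cases hd : gl.drop gp with
        | nil => simp [cwuChain, cwuLoopB]
        | cons g gs =>
          have hgp : gp < gl.length := by
            by_contra hge
            rw [List.drop_eq_nil_of_le (by omega)] at hd
            simp at hd
          have hgd : gl.getD gp [] = g := by
            have h2 := List.drop_eq_getElem_cons hgp
            rw [hd] at h2
            injection h2 with h3 _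
            rw [List.getD_eq_getElem gl [] hgp, ← h3]
          rw [hd] at hc
          cases g with
          | nil => simp [cwuChain] at hc
          | cons s rest =>
            have hsne : s ≠ cur := by
              intro heq
              exact hm ⟨hgp, by rw [hgd, PySem.List.pyGet?_zero_cons, heq]⟩
            simp only [cwuChain, cwuLoopB] at hc ⊢
            by_cases hb : s < cur ∨ s ≥ (wl.length : Int)
            · have hb' : s < cur + 1 ∨ s ≥ (wl.length : Int) := by omega
              exact ⟨by rw [if_pos hb'], by rw [if_pos hb, if_pos hb']⟩
            · have hb' : ¬ (s < cur + 1 ∨ s ≥ (wl.length : Int)) := by omega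
              rw [if_neg hb] at hc
              refine ⟨?_, ?_⟩
              · rw [if_neg hb']; exact hc
              · rw [if_neg hb, if_neg hb']
      have hrec := cwu_main gl wl gp (cur + 1) ret (by omega) (by omega) hkey.1
      rw [hrec, hkey.2]
  · -- cursor at the end of the word list: A returns ret, B emits nothing more
    simp only [hi, dite_false]
    have hn : cur = (wl.length : Int) := by omega
    cases hd : gl.drop gp with
    | nil => simp [cwuLoopB]
    | cons g gs =>
      rw [hd] at hc
      cases g with
      | nil => simp [cwuChain] at hc
      | cons s rest =>
        simp only [cwuChain] at hc
        by_cases hb : s < cur ∨ s ≥ (wl.length : Int)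
        · simp [cwuLoopB, if_pos hb]
        · exact absurd (by omega : s < cur ∨ s ≥ (wl.length : Int)) hb
termination_by (gl.length - gp, ((wl.length : Int) - cur).toNat)
decreasing_by
  · exact Prod.Lex.left _ _ (by omega)
  · exact Prod.Lex.right _ (by omega)

theorem cwuLoopB_nil_words (pre : List Int) (gl : List (List Int)) :
    cwuLoopB pre 0 gl 0 = [] := by
  cases gl with
  | nil => rfl
  | cons g gs =>
    cases g with
    | nil => rfl
    | cons s rest =>
      simp only [cwuLoopB]
      rw [if_pos (by omega)]

-- ===== VERDICT (by name: the statement is the Claim_ definition above) =====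
theorem convert_word_unit_spec : Claim_equal_convert_word_unit := by
  intro gl wl _ hpre
  unfold Spec_convert_word_unit convert_word_unit convert_word_unit_alt
  rcases hpre with hnil | ⟨k, hk, hgood, hend⟩
  · subst hnil
    rw [cwuLoopA]
    simp [cwuLoopB_nil_words]
  · have hchain := cwuChain_of_closed (wl.length : Int) gl 0 k hk hgood hend
    have h := cwu_main gl wl 0 0 [] le_rfl (by positivity) (by simpa using hchain)
    simpa [pfxAt] using h
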